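-- pv_equiv track=rewrite | github.com/ZeinabRabea/SuffixAligner | Mapping.py | cc3
-- ===== SOURCE A (Python) =====
-- def cc3(bw):
-- #return C[c]
--     bw=sorted(bw)
--     cc=dict()
--     x=0
--     for c in bw:
--         if c not in cc: cc[c]=x
--         x+=1
--     return cc
-- ===== SOURCE B (Python) =====
-- def cc3(bw):
--     # Sort once; each distinct symbol's C-value is the index of its first
--     # occurrence in the sorted list, found by binary search (bisect_left).
--     s = sorted(bw)
--     out = {}
--     for k in sorted(set(bw)):
--         lo, hi = 0, len(s)
--         while lo < hi:
--             mid = (lo + hi) // 2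
--             if s[mid] < k:
--                 lo = mid + 1
--             else:
--                 hi = mid
--         out[k] = lo
--     return out
-- ===== Notes on version B (the rewrite author's own statement) =====
-- stated objective: alternative
-- what changed: Instead of scanning the sorted list with a running index and dict-membership tests, B maps each distinct symbol (sorted) to the index of its first occurrence in the sorted list found by a hand-written binary search (bisect_left).
import Mathlib
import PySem

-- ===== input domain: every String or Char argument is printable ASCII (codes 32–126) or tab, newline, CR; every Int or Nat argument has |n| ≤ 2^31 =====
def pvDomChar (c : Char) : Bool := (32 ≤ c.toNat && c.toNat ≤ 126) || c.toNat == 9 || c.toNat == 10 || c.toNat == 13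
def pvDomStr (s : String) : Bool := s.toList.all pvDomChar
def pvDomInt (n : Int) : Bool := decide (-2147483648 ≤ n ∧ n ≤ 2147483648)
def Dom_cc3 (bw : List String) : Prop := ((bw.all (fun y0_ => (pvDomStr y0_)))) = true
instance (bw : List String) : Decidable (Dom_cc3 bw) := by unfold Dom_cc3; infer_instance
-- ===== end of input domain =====

-- B finds each distinct symbol's first position in the sorted list by binary
-- search instead of A's single scan with a running index and dict membership.

-- ===== PORT A =====
-- bw = sorted(bw); cc = {}; x = 0; for c in bw: if c not in cc: cc[c] = x; x += 1; return cc
def cc3 (bw : List String) : List (String × Int) :=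
  let s := PySem.List.sorted bw (fun c => c) false
  let st := s.foldl
    (fun (st : PySem.Dict String Int × Int) c =>
      (if st.1.contains c then st.1 else st.1.insert c st.2, st.2 + 1))
    (PySem.Dict.empty, 0)
  st.1.items

-- ===== PORT B =====
-- s = sorted(bw); for k in sorted(set(bw)): bisect_left by hand; out[k] = lo
-- while lo < hi: mid = (lo+hi)//2; if s[mid] < k: lo = mid+1 else: hi = mid
-- (s[mid] is ported with getD: mid is always in range, so getD is exact here)
def bisLoop (s : List String) (k : String) (lo hi : Nat) : Nat :=
  if _h : lo < hi then
    let mid := (lo + hi) / 2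
    if s.getD mid "" < k then bisLoop s k (mid + 1) hi else bisLoop s k lo mid
  else lo
termination_by hi - lo
decreasing_by all_goals omega

def cc3_alt (bw : List String) : List (String × Int) :=
  let s := PySem.List.sorted bw (fun c => c) false
  (PySem.List.sorted (PySem.Set.ofList bw) (fun k => k) false).map
    (fun k => (k, (bisLoop s k 0 s.length : Int)))

-- ===== PRECONDITION & SPEC =====
def Spec_cc3 (bw : List String) (out : List (String × Int)) : Prop := out = cc3_alt bw
instance (bw : List String) (out : List (String × Int)) : Decidable (Spec_cc3 bw out) := by unfold Spec_cc3; infer_instance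

-- ===== CLAIM (what is proved, stated in full; the proofs are below) =====
def Claim_equal_cc3 : Prop := ∀ (bw : List String), Dom_cc3 bw → Spec_cc3 bw (cc3 bw)

-- ===== LEMMAS AND PROOFS =====

-- prefix-sum shape of A's result over the sorted distinct keys
def pmList (g : String → Int) : List String → Int → List (String × Int)
  | [], _ => []
  | k :: ks, t => (k, t) :: pmList g ks (t + g k)

theorem A_block (k : String) (n : Nat) (d : PySem.Dict String Int) (x : Int)
    (hk : d.contains k = true) :
    ((List.replicate n k).foldl (fun (st : PySem.Dict String Int × Int) c =>
        (if st.1.contains c then st.1 else st.1.insert c st.2, st.2 + 1)) (d, x))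
      = (d, x + n) := by
  induction n generalizing x with
  | zero => simp
  | succ m ih =>
    rw [List.replicate_succ, List.foldl_cons]
    simp only [hk, if_true]
    rw [ih (x + 1)]
    congr 1
    push_cast
    ring

theorem A_loop (g : String → Nat) (K : List String) (d : PySem.Dict String Int) (x : Int)
    (hfresh : ∀ k ∈ K, d.contains k = false) (hnd : K.Nodup) (hpos : ∀ k ∈ K, 0 < g k) :
    (((K.flatMap (fun k => List.replicate (g k) k)).foldl
        (fun (st : PySem.Dict String Int × Int) c =>
          (if st.1.contains c then st.1 else st.1.insert c st.2, st.2 + 1)) (d, x)).1.items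
      = d.items ++ pmList (fun k => (g k : Int)) K x) := by
  induction K generalizing d x with
  | nil => simp [pmList]
  | cons k ks ih =>
    rw [List.flatMap_cons, List.foldl_append]
    obtain ⟨m, hm⟩ : ∃ m, g k = m + 1 :=
      ⟨g k - 1, by have := hpos k (by simp); omega⟩
    rw [hm, List.replicate_succ, List.foldl_cons]
    simp only [hfresh k (by simp), Bool.false_eq_true, if_false]
    rw [A_block k m _ (x + 1) (PySem.Dict.contains_insert_self d k x)]
    rw [ih (d.insert k x) (x + 1 + m)
        (fun k' hk' => by
          rw [PySem.Dict.contains_insert]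
          have hne : k' ≠ k := fun he => (List.nodup_cons.mp hnd).1 (he ▸ hk')
          simp [hne, hfresh k' (by simp [hk'])])
        (List.nodup_cons.mp hnd).2
        (fun k' hk' => hpos k' (by simp [hk']))]
    rw [PySem.Dict.items_insert_of_not_contains d x (hfresh k (by simp))]
    simp only [pmList, hm, List.append_assoc, List.singleton_append]
    push_cast
    ring_nf

theorem count_flatMap_replicate (g : String → Nat) (K : List String) (hnd : K.Nodup) (x : String) :
    (K.flatMap (fun k => List.replicate (g k) k)).count x = if x ∈ K then g x else 0 := by
  induction K with
  | nil => simp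
  | cons k ks ih =>
    rw [List.flatMap_cons, List.count_append, List.count_replicate,
        ih (List.nodup_cons.mp hnd).2]
    by_cases hx : x = k
    · subst hx
      simp [(List.nodup_cons.mp hnd).1]
    · simp [hx, Ne.symm hx]

theorem pairwise_flatMap_replicate (g : String → Nat) (K : List String)
    (h : K.Pairwise (· < ·)) :
    (K.flatMap (fun k => List.replicate (g k) k)).Pairwise (· ≤ ·) := by
  induction K with
  | nil => simp
  | cons k ks ih =>
    rw [List.flatMap_cons, List.pairwise_append]
    refine ⟨List.pairwise_replicate.mpr (by simp), ih (List.pairwise_cons.mp h).2, ?_⟩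
    intro a ha b hb
    obtain rfl := List.eq_of_mem_replicate ha
    obtain ⟨k', hk', hb'⟩ := List.mem_flatMap.mp hb
    rw [List.eq_of_mem_replicate hb']
    exact le_of_lt ((List.pairwise_cons.mp h).1 k' hk')

theorem sorted_eq_flatMap (bw : List String) :
    PySem.List.sorted bw (fun c => c) false
      = (PySem.List.sorted (PySem.Set.ofList bw) (fun k => k) false).flatMap
          (fun k => List.replicate (bw.count k) k) := by
  set K := PySem.List.sorted (PySem.Set.ofList bw) (fun k => k) false with hKdef
  have hKlt : K.Pairwise (· < ·) := PySem.List.sorted_ofList_pairwise_lt bw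
  have hKnd : K.Nodup := hKlt.nodup
  have hKmem : ∀ x, x ∈ K ↔ x ∈ bw := by
    intro x
    rw [hKdef, PySem.List.mem_sorted, PySem.Set.mem_ofList]
  apply PySem.List.sorted_id_eq_of_perm_of_pairwise
  · rw [List.perm_iff_count]
    intro x
    rw [count_flatMap_replicate _ _ hKnd]
    by_cases hx : x ∈ bw
    · simp [(hKmem x).mpr hx]
    · have hxK : x ∉ K := fun h => hx ((hKmem x).mp h)
      simp [hxK, List.count_eq_zero_of_not_mem hx]
  · exact pairwise_flatMap_replicate _ _ hKlt

-- sorted lists are monotone under positional getD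
theorem getD_mono (s : List String) (hs : s.Pairwise (· ≤ ·)) (i j : Nat)
    (hij : i ≤ j) (hj : j < s.length) : s.getD i "" ≤ s.getD j "" := by
  rw [List.getD_eq_getElem _ _ (lt_of_le_of_lt hij hj), List.getD_eq_getElem _ _ hj]
  rcases Nat.lt_or_ge i j with h | h
  · exact List.pairwise_iff_getElem.mp hs i j _ hj h
  · have : i = j := le_antisymm hij h
    subst this; exact le_refl _

-- B's binary search returns a split point of the sorted list around k
theorem bisLoop_inv (s : List String) (k : String) (lo hi : Nat)
    (hs : s.Pairwise (· ≤ ·)) (hhi : hi ≤ s.length) (hle : lo ≤ hi)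
    (hlo : ∀ i, i < lo → s.getD i "" < k)
    (hup : ∀ i, hi ≤ i → i < s.length → ¬ s.getD i "" < k) :
    (∀ i, i < bisLoop s k lo hi → s.getD i "" < k) ∧
      (∀ i, bisLoop s k lo hi ≤ i → i < s.length → ¬ s.getD i "" < k) ∧
      bisLoop s k lo hi ≤ s.length := by
  induction lo, hi using bisLoop.induct s k with
  | case1 lo hi h mid hmidlt ih =>
    rw [bisLoop]
    have hc : s.getD ((lo + hi) / 2) "" < k := hmidlt
    simp only [h, dif_pos, if_pos hc]
    have hmid : lo ≤ mid ∧ mid < hi := by constructor <;> omega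
    exact ih hhi (by omega)
      (fun i hi' => lt_of_le_of_lt
        (getD_mono s hs i mid (by omega) (lt_of_lt_of_le hmid.2 hhi)) hmidlt)
      hup
  | case2 lo hi h mid hmidge ih =>
    rw [bisLoop]
    have hc : ¬ s.getD ((lo + hi) / 2) "" < k := hmidge
    simp only [h, dif_pos, if_neg hc]
    have hmid : lo ≤ mid ∧ mid < hi := by constructor <;> omega
    exact ih (le_trans (le_of_lt hmid.2) hhi) hmid.1 hlo
      (fun i hi' hilen hbad =>
        hmidge (lt_of_le_of_lt (getD_mono s hs mid i hi' hilen) hbad))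
  | case3 lo hi h =>
    rw [bisLoop]
    simp only [h]
    have : lo = hi := by omega
    subst this
    exact ⟨hlo, hup, hhi⟩

-- a predicate true exactly on the first r positions has count r
theorem countP_prefix (s : List String) (p : String → Bool) (r : Nat)
    (hr : r ≤ s.length)
    (h1 : ∀ i, i < r → p (s.getD i "") = true)
    (h2 : ∀ i, r ≤ i → i < s.length → p (s.getD i "") = false) :
    s.countP p = r := by
  induction s generalizing r with
  | nil => simp [Nat.le_zero.mp (by simpa using hr)]
  | cons a t ih =>
    cases r with
    | zero =>
      rw [List.countP_cons, ih 0 (by omega) (by omega)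
          (fun i _ hi => h2 (i + 1) (by omega) (by simpa using hi))]
      have := h2 0 (by omega) (by simp)
      simp only [List.getD_cons_zero] at this
      simp [this]
    | succ r' =>
      rw [List.countP_cons, ih r' (by simpa using hr)
          (fun i hi => h1 (i + 1) (by omega))
          (fun i hi hilen => h2 (i + 1) (by omega) (by simpa using hilen))]
      have := h1 0 (by omega)
      simp only [List.getD_cons_zero] at this
      simp [this]

theorem countP_or_disjoint (p q : String → Bool) (l : List String)
    (h : ∀ x ∈ l, ¬(p x = true ∧ q x = true)) :
    l.countP (fun x => p x || q x) = l.countP p + l.countP q := by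
  induction l with
  | nil => simp
  | cons a as ih =>
    rw [List.countP_cons, List.countP_cons, List.countP_cons,
        ih (fun x hx => h x (by simp [hx]))]
    have := h a (by simp)
    cases hp : p a <;> cases hq : q a <;> simp_all <;> omega

-- prefix sums of counts = count of strictly smaller elements, over sorted keys
theorem pm_map (bw : List String) (ks : List String) (t : Int)
    (hs : ks.Pairwise (· < ·))
    (hcover : ∀ x ∈ bw, x ∈ ks ∨ ∀ k ∈ ks, x < k)
    (ht : ∀ k, ks.head? = some k → t = (bw.countP (fun c => decide (c < k)) : Int)) :
    pmList (fun k => (bw.count k : Int)) ks t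
      = ks.map (fun k => (k, (bw.countP (fun c => decide (c < k)) : Int))) := by
  induction ks generalizing t with
  | nil => rfl
  | cons k ks ih =>
    have hhead := ht k rfl
    simp only [pmList, List.map_cons]
    refine congrArg₂ _ (by rw [hhead]) ?_
    refine ih _ (List.pairwise_cons.mp hs).2 ?_ ?_
    · intro x hx
      rcases hcover x hx with hmem | hlt
      · rcases List.mem_cons.mp hmem with rfl | hmem'
        · exact Or.inr (fun k' hk' => (List.pairwise_cons.mp hs).1 k' hk')
        · exact Or.inl hmem'
      · exact Or.inr (fun k' hk' => hlt k' (by simp [hk']))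
    · intro k₂ hk₂
      obtain ⟨rest, hrest⟩ : ∃ rest, ks = k₂ :: rest := by
        cases ks with
        | nil => simp at hk₂
        | cons a b => exact ⟨b, by simpa using by simp_all⟩
      subst hrest
      have hkk₂ : k < k₂ := (List.pairwise_cons.mp hs).1 k₂ (by simp)
      have hsplit : bw.countP (fun c => decide (c < k₂))
          = bw.countP (fun c => decide (c < k)) + bw.count k := by
        have hcongr : bw.countP (fun c => decide (c < k₂))
            = bw.countP (fun c => decide (c < k) || (c == k)) := by
          apply List.countP_congr
          intro x hx
          simp only [decide_eq_true_eq, Bool.or_eq_true, beq_iff_eq]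
          constructor
          · intro hxlt
            rcases hcover x hx with hmem | hlt
            · rcases List.mem_cons.mp hmem with rfl | hmem'
              · exact Or.inr rfl
              · rcases List.mem_cons.mp hmem' with rfl | hmem''
                · exact absurd hxlt (lt_irrefl _)
                · exact absurd hxlt
                    (not_lt_of_gt ((List.pairwise_cons.mp (List.pairwise_cons.mp hs).2).1 x hmem''))
            · exact Or.inl (hlt k (by simp))
          · rintro (hlt | rfl)
            · exact lt_trans hlt hkk₂
            · exact hkk₂
        rw [hcongr, countP_or_disjoint _ _ _ (by
          intro x _ ⟨hp, hq⟩
          simp only [decide_eq_true_eq] at hp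
          exact absurd ((beq_iff_eq).mp hq ▸ hp) (lt_irrefl k)),
          List.count]
      rw [hhead, hsplit]
      push_cast
      ring

theorem cc3_eq_alt (bw : List String) : cc3 bw = cc3_alt bw := by
  simp only [cc3, cc3_alt]
  set K := PySem.List.sorted (PySem.Set.ofList bw) (fun k => k) false with hKdef
  have hKlt : K.Pairwise (· < ·) := PySem.List.sorted_ofList_pairwise_lt bw
  have hKnd : K.Nodup := hKlt.nodup
  have hKmem : ∀ x, x ∈ K ↔ x ∈ bw := by
    intro x
    rw [hKdef, PySem.List.mem_sorted, PySem.Set.mem_ofList]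
  rw [sorted_eq_flatMap bw, ← hKdef]
  rw [A_loop (fun k => bw.count k) K PySem.Dict.empty 0
        (fun k _ => PySem.Dict.contains_empty k) hKnd
        (fun k hk => List.count_pos_iff.mpr ((hKmem k).mp hk))]
  have hempty : (PySem.Dict.empty : PySem.Dict String Int).items = [] := rfl
  rw [hempty, List.nil_append]
  rw [pm_map bw K 0 hKlt (fun x hx => Or.inl ((hKmem x).mpr hx))]
  · apply List.map_congr_left
    intro k _
    have hflat := sorted_eq_flatMap bw
    rw [← hKdef] at hflat
    rw [← hflat]
    refine congrArg _ (congrArg _ ?_)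
    set s := PySem.List.sorted bw (fun c => c) false with hsdef
    have hs : s.Pairwise (· ≤ ·) := PySem.List.sorted_pairwise bw (fun c => c)
    obtain ⟨h1, h2, hlen⟩ := bisLoop_inv s k 0 s.length hs (le_refl _) (Nat.zero_le _)
      (fun i hi => absurd hi (Nat.not_lt_zero i))
      (fun i hle hlt => absurd (lt_of_le_of_lt hle hlt) (lt_irrefl _))
    rw [← (PySem.List.sorted_perm bw (fun c => c) false).countP_eq, ← hsdef]
    exact countP_prefix s (fun c => decide (c < k)) (bisLoop s k 0 s.length) hlen
      (fun i hi => by simp only [decide_eq_true_eq]; exact h1 i hi)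
      (fun i hi hilen => by simp only [decide_eq_false_iff_not]; exact h2 i hi hilen)
  · intro k hk
    have hnone : ∀ x ∈ bw, ¬ x < k := by
      intro x hx hxk
      have hxK : x ∈ K := (hKmem x).mpr hx
      have hkK : K = k :: K.tail := by
        cases hK : K with
        | nil => rw [hK] at hk; simp at hk
        | cons a b => rw [hK] at hk; simp at hk; simp [hk]
      rw [hkK] at hxK hKlt
      rcases List.mem_cons.mp hxK with rfl | hmem
      · exact absurd hxk (lt_irrefl _)
      · exact absurd hxk (not_lt_of_gt ((List.pairwise_cons.mp hKlt).1 x hmem))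
    rw [List.countP_eq_zero.mpr (by intro x hx; simpa using hnone x hx)]
    simp

-- ===== VERDICT (by name: the statement is the Claim_ definition above) =====
theorem cc3_spec : Claim_equal_cc3 := by
  intro bw _
  exact cc3_eq_alt bw
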